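-- pv_equiv track=rewrite | github.com/Sanket-Khambal/UI-State-Capture | main.py | is_login_page
-- ===== SOURCE A (Python) =====
-- LOGIN_URL_PATTERNS = [
--     "login", "signin", "sign-in", "sign_in",
--     "auth", "authenticate", "oauth",
--     "signup"
-- ]
--
-- LOGIN_PAGE_INDICATORS = [
--     "password", "email", "username", "sign in", "log in",
--     "forgot password", "create account", "register","signup"
-- ]
--
-- def is_login_page(url: str, title: str = "") -> bool:
--     url_lower = url.lower()
--     title_lower = title.lower()
--
--     for pattern in LOGIN_URL_PATTERNS:
--         if pattern in url_lower:
--             return True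
--
--     for indicator in LOGIN_PAGE_INDICATORS:
--         if indicator in title_lower:
--             return True
--
--     return False
-- ===== SOURCE B (Python) =====
-- LOGIN_URL_PATTERNS = [
--     "login", "signin", "sign-in", "sign_in",
--     "auth", "authenticate", "oauth",
--     "signup"
-- ]
--
-- LOGIN_PAGE_INDICATORS = [
--     "password", "email", "username", "sign in", "log in",
--     "forgot password", "create account", "register", "signup"
-- ]
--
--
-- def _contains_any(s: str, patterns) -> bool:
--     # single left-to-right scan: at each position, test whether any pattern starts there
--     for i in range(len(s) + 1):
--         tail = s[i:]
--         for p in patterns: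
--             if tail.startswith(p):
--                 return True
--     return False
--
--
-- def is_login_page(url: str, title: str = "") -> bool:
--     return (_contains_any(url.lower(), LOGIN_URL_PATTERNS)
--             or _contains_any(title.lower(), LOGIN_PAGE_INDICATORS))
-- ===== Notes on version B (the rewrite author's own statement) =====
-- stated objective: alternative
-- what changed: Replaced the two pattern-outer loops (one substring scan per pattern via 'in') by a single position-outer left-to-right scan of each lowered string that at every position checks whether any pattern starts there.
import Mathlib
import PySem

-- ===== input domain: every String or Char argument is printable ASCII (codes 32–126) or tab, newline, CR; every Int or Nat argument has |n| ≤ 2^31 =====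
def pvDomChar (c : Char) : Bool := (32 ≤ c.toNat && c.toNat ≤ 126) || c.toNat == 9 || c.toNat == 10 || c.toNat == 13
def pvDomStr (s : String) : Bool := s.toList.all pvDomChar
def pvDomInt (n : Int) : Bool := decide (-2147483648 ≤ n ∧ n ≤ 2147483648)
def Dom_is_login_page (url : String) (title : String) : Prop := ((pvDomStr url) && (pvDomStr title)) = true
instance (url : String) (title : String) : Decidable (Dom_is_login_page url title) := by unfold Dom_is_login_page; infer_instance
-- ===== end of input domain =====

-- B replaces the two pattern-outer substring-scan loops by one position-outer scan of each
-- lowered string, testing at every position whether any pattern starts there (objective: alternative).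


-- ===== PORT A =====
def LOGIN_URL_PATTERNS : List String :=
  ["login", "signin", "sign-in", "sign_in", "auth", "authenticate", "oauth", "signup"]

def LOGIN_PAGE_INDICATORS : List String :=
  ["password", "email", "username", "sign in", "log in",
   "forgot password", "create account", "register", "signup"]

-- the two for-loops with early 'return True' are short-circuit existential scans: List.any
def is_login_page (url : String) (title : String) : Bool :=
  let url_lower := PySem.Str.lower url
  let title_lower := PySem.Str.lower title
  if LOGIN_URL_PATTERNS.any (fun pattern => PySem.Str.isIn pattern url_lower) then true
  else if LOGIN_PAGE_INDICATORS.any (fun indicator => PySem.Str.isIn indicator title_lower) then true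
  else false

-- ===== PORT B =====
def B_LOGIN_URL_PATTERNS : List (List Char) := LOGIN_URL_PATTERNS.map String.toList
def B_LOGIN_PAGE_INDICATORS : List (List Char) := LOGIN_PAGE_INDICATORS.map String.toList

-- _contains_any: for i in range(len(s)+1): tail = s[i:]; for p: if tail.startswith(p): return True
def pvContainsAny (s : List Char) (patterns : List (List Char)) : Bool :=
  (List.range (s.length + 1)).any fun i =>
    let tail := s.drop i
    patterns.any fun p => PySem.Chars.startswith tail p

def is_login_page_alt (url : String) (title : String) : Bool :=
  pvContainsAny (PySem.Chars.lower url.toList) B_LOGIN_URL_PATTERNS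
    || pvContainsAny (PySem.Chars.lower title.toList) B_LOGIN_PAGE_INDICATORS

-- ===== PRECONDITION & SPEC =====
def Spec_is_login_page (url : String) (title : String) (out : Bool) : Prop := out = is_login_page_alt url title
instance (url : String) (title : String) (out : Bool) : Decidable (Spec_is_login_page url title out) := by unfold Spec_is_login_page; infer_instance

-- ===== CLAIM (what is proved, stated in full; the proofs are below) =====
def Claim_equal_is_login_page : Prop := ∀ (url : String) (title : String), Dom_is_login_page url title → Spec_is_login_page url title (is_login_page url title)

-- ===== LEMMAS AND PROOFS =====

-- the position-outer scan finds some pattern iff some pattern is a substring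
theorem pvContainsAny_eq_any_isIn (s : List Char) (pats : List (List Char)) :
    pvContainsAny s pats = pats.any fun p => PySem.Chars.isIn p s := by
  unfold pvContainsAny
  rw [Bool.eq_iff_iff]
  simp only [List.any_eq_true, List.mem_range]
  constructor
  · rintro ⟨i, -, p, hp, hsw⟩
    refine ⟨p, hp, ?_⟩
    rw [PySem.Chars.isIn_iff_infix]
    exact (List.infix_iff_prefix_suffix.mpr
      ⟨s.drop i, (PySem.Chars.startswith_iff _ _).mp hsw, List.drop_suffix i s⟩)
  · rintro ⟨p, hp, hin⟩
    obtain ⟨j, hpre⟩ := (PySem.Chars.exists_prefix_drop_iff_isIn p s).mpr hin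
    refine ⟨min j s.length, by omega, p, hp, ?_⟩
    rw [PySem.Chars.startswith_iff]
    by_cases h : j ≤ s.length
    · simpa [Nat.min_eq_left h] using hpre
    · have : p = [] := List.prefix_nil.mp (by simpa [List.drop_eq_nil_of_le (Nat.le_of_not_le h)] using hpre)
      simp [this]

-- ===== VERDICT (by name: the statement is the Claim_ definition above) =====
theorem is_login_page_spec : Claim_equal_is_login_page := by
  intro url title _
  unfold Spec_is_login_page is_login_page is_login_page_alt
  rw [pvContainsAny_eq_any_isIn, pvContainsAny_eq_any_isIn]
  simp only [B_LOGIN_URL_PATTERNS, B_LOGIN_PAGE_INDICATORS, List.any_map, Function.comp_def]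
  split_ifs with h1 h2 <;>
    simp_all [List.any_eq_true, PySem.Str.lower, PySem.Str.isIn]
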